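-- pv_equiv track=rewrite | github.com/modu/website_grokit_ca | articles/web_cs_review/BuildTreeFromPreorderInorder/bst_from_pre_ino.py | findLeftmostAInB
-- ===== SOURCE A (Python) =====
-- def findLeftmostAInB(A, B):
--
--     # Could put B in a hash to make it faster.
--     T = []
--     for a in A:
--         i = 0
--         for b in B:
--             if a == b:
--                 T.append((a, i))
--                 break
--             i += 1
--
--     if len(T) == 0:
--         raise Exception("Mismatch")
--
--     T.sort(key= lambda x: x[1])
--     return T[0][0]
-- ===== SOURCE B (Python) =====
-- def findLeftmostAInB(A, B):
--     for b in B: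
--         if b in A:
--             return b
--     raise Exception("Mismatch")
-- ===== Notes on version B (the rewrite author's own statement) =====
-- stated objective: simpler
-- what changed: Instead of collecting (value, B-index) pairs for every A element and sorting them by index, B scans B once in order and returns the first element that belongs to A, raising the same Exception when there is none.
import Mathlib
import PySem

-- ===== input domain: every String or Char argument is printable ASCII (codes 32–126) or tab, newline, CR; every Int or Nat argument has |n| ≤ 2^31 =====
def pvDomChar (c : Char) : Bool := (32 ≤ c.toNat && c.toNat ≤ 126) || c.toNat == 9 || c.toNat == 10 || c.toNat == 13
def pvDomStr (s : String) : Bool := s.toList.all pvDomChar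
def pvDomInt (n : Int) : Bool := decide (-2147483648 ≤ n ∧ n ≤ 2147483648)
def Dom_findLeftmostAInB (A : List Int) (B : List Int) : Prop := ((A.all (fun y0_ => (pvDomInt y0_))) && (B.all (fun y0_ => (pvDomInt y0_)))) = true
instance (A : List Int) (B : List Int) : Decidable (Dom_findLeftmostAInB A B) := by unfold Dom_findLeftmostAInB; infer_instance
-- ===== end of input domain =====

-- B replaces A's pair-collection-plus-sort by a single scan of B returning the first
-- element that belongs to A (objective: simpler).

-- ===== PORT A =====
-- the inner 'for b in B: if a == b: append (a,i); break; i += 1' loop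
def pvInner (a : Int) (i : Int) : List Int → Option (Int × Int)
  | [] => none
  | b :: rest => if a = b then some (a, i) else pvInner a (i + 1) rest

-- the outer 'for a in A:' loop building T
def pvBuildT (A B : List Int) : List (Int × Int) :=
  A.foldl (fun T a =>
    match pvInner a 0 B with
    | some p => T ++ [p]
    | none => T) []

def findLeftmostAInB (A : List Int) (B : List Int) : Int :=
  -- 'if len(T) == 0: raise Exception("Mismatch")' — excluded by Pre_findLeftmostAInB
  match PySem.List.sorted (pvBuildT A B) (fun x => x.2) with
  | [] => 0
  | p :: _ => p.1

-- ===== PORT B =====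
def findLeftmostAInB_alt (A : List Int) (B : List Int) : Int :=
  match B with
  | [] => 0  -- 'raise Exception("Mismatch")' — excluded by Pre_findLeftmostAInB
  | b :: rest => if b ∈ A then b else findLeftmostAInB_alt A rest

-- ===== PRECONDITION & SPEC =====
-- Pre_ excludes exactly the inputs with no common element, on which the Python A
-- (and B) raises Exception("Mismatch").
def Pre_findLeftmostAInB (A : List Int) (B : List Int) : Prop := ∃ b ∈ B, b ∈ A
instance (A : List Int) (B : List Int) : Decidable (Pre_findLeftmostAInB A B) := by
  unfold Pre_findLeftmostAInB; infer_instance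
def pvWitness_findLeftmostAInB : List Int × List Int := ([3, 1], [2, 1, 3])

def Spec_findLeftmostAInB (A : List Int) (B : List Int) (out : Int) : Prop := out = findLeftmostAInB_alt A B
instance (A : List Int) (B : List Int) (out : Int) : Decidable (Spec_findLeftmostAInB A B out) := by unfold Spec_findLeftmostAInB; infer_instance

-- ===== CLAIM (what is proved, stated in full; the proofs are below) =====
def Claim_equal_findLeftmostAInB : Prop := ∀ (A : List Int) (B : List Int), Dom_findLeftmostAInB A B → Pre_findLeftmostAInB A B → Spec_findLeftmostAInB A B (findLeftmostAInB A B)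

-- ===== LEMMAS AND PROOFS =====

-- first index of a in B (0-based; unspecified when a ∉ B)
def pvFidx (a : Int) : List Int → Nat
  | [] => 0
  | b :: rest => if a = b then 0 else pvFidx a rest + 1

theorem pvInner_eq (a : Int) : ∀ (B : List Int) (i : Int),
    pvInner a i B = if a ∈ B then some (a, i + (pvFidx a B : Int)) else none := by
  intro B
  induction B with
  | nil => intro i; simp [pvInner]
  | cons b rest ih =>
    intro i
    by_cases h : a = b
    · simp [pvInner, pvFidx, h]
    · simp only [pvInner, pvFidx, if_neg h, ih (i + 1), List.mem_cons]
      by_cases hm : a ∈ rest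
      · simp [hm, h]; ring
      · simp [hm, h]

theorem pvFidx_inj {a c : Int} : ∀ {B : List Int}, a ∈ B → c ∈ B →
    pvFidx a B = pvFidx c B → a = c := by
  intro B
  induction B with
  | nil => simp
  | cons b rest ih =>
    intro ha hc h
    by_cases h1 : a = b <;> by_cases h2 : c = b
    · exact h1.trans h2.symm
    · simp [pvFidx, h1, h2] at h
    · simp [pvFidx, h1, h2] at h
    · simp only [pvFidx, if_neg h1, if_neg h2, Nat.add_right_cancel_iff] at h
      rcases List.mem_cons.1 ha with rfl | ha'
      · exact absurd rfl h1
      rcases List.mem_cons.1 hc with rfl | hc'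
      · exact absurd rfl h2
      exact ih ha' hc' h

-- membership in A's collected list T, generalized over the accumulator
theorem mem_foldT (B : List Int) : ∀ (A : List Int) (acc : List (Int × Int)) (p : Int × Int),
    p ∈ A.foldl (fun T a =>
      match pvInner a 0 B with
      | some q => T ++ [q]
      | none => T) acc ↔
    p ∈ acc ∨ (p.1 ∈ A ∧ p.1 ∈ B ∧ p.2 = (pvFidx p.1 B : Int)) := by
  intro A
  induction A with
  | nil => simp
  | cons a A ih =>
    intro acc p
    obtain ⟨p1, p2⟩ := p
    rw [List.foldl_cons]
    have hin := pvInner_eq a B 0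
    by_cases h : a ∈ B
    · rw [if_pos h] at hin
      rw [hin, ih]
      simp only [List.mem_append, List.mem_cons, List.not_mem_nil, or_false, Prod.mk.injEq, zero_add]
      constructor
      · rintro ((hp | ⟨rfl, rfl⟩) | ⟨h1, h2, h3⟩)
        · exact Or.inl hp
        · exact Or.inr ⟨Or.inl rfl, h, rfl⟩
        · exact Or.inr ⟨Or.inr h1, h2, h3⟩
      · rintro (hp | ⟨(rfl | h1), h2, h3⟩)
        · exact Or.inl (Or.inl hp)
        · exact Or.inl (Or.inr ⟨rfl, h3⟩)
        · exact Or.inr ⟨h1, h2, h3⟩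
    · rw [if_neg h] at hin
      rw [hin, ih]
      simp only [List.mem_cons]
      constructor
      · rintro (hp | ⟨h1, h2, h3⟩)
        · exact Or.inl hp
        · exact Or.inr ⟨Or.inr h1, h2, h3⟩
      · rintro (hp | ⟨(rfl | h1), h2, h3⟩)
        · exact Or.inl hp
        · exact absurd h2 h
        · exact Or.inr ⟨h1, h2, h3⟩

theorem mem_pvBuildT (A B : List Int) (p : Int × Int) :
    p ∈ pvBuildT A B ↔ p.1 ∈ A ∧ p.1 ∈ B ∧ p.2 = (pvFidx p.1 B : Int) := by
  rw [pvBuildT, mem_foldT]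
  simp

-- B's answer is in both lists and has the minimal first index in B
theorem alt_min (A : List Int) : ∀ (B : List Int), (∃ b ∈ B, b ∈ A) →
    findLeftmostAInB_alt A B ∈ B ∧ findLeftmostAInB_alt A B ∈ A ∧
    ∀ x ∈ A, x ∈ B → pvFidx (findLeftmostAInB_alt A B) B ≤ pvFidx x B := by
  intro B
  induction B with
  | nil => rintro ⟨b, hb, -⟩; cases hb
  | cons b rest ih =>
    intro hex
    by_cases hb : b ∈ A
    · refine ⟨by simp [findLeftmostAInB_alt, hb], by simpa [findLeftmostAInB_alt, hb] using hb, ?_⟩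
      intro x hx hxB
      simp [findLeftmostAInB_alt, hb, pvFidx]
    · have hex' : ∃ c ∈ rest, c ∈ A := by
        rcases hex with ⟨c, hc, hcA⟩
        rcases List.mem_cons.1 hc with rfl | hc'
        · exact absurd hcA hb
        · exact ⟨c, hc', hcA⟩
      obtain ⟨h1, h2, h3⟩ := ih hex'
      have hne : findLeftmostAInB_alt A rest ≠ b := fun h => hb (h ▸ h2)
      refine ⟨?_, ?_, ?_⟩
      · simp only [findLeftmostAInB_alt, if_neg hb, List.mem_cons]
        exact Or.inr h1
      · simpa [findLeftmostAInB_alt, hb] using h2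
      · intro x hx hxB
        have hxne : x ≠ b := fun h => hb (h ▸ hx)
        have hxrest : x ∈ rest := by
          rcases List.mem_cons.1 hxB with rfl | hr
          · exact absurd rfl hxne
          · exact hr
        simp only [findLeftmostAInB_alt, if_neg hb, pvFidx, if_neg hne, if_neg hxne]
        exact Nat.succ_le_succ (h3 x hx hxrest)

-- ===== VERDICT (by name: the statement is the Claim_ definition above) =====
theorem findLeftmostAInB_spec : Claim_equal_findLeftmostAInB := by
  intro A B _ hpre
  obtain ⟨c0, hc0B, hc0A⟩ := hpre
  unfold Spec_findLeftmostAInB findLeftmostAInB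
  have hmemT : ((c0, (pvFidx c0 B : Int)) : Int × Int) ∈ pvBuildT A B :=
    (mem_pvBuildT A B _).2 ⟨hc0A, hc0B, rfl⟩
  cases hS : PySem.List.sorted (pvBuildT A B) (fun x => x.2) with
  | nil =>
    have : pvBuildT A B = [] := (PySem.List.sorted_eq_nil_iff _ _ _).1 hS
    rw [this] at hmemT
    cases hmemT
  | cons p t =>
    show p.1 = findLeftmostAInB_alt A B
    have hpT : p ∈ pvBuildT A B :=
      (PySem.List.mem_sorted _ _ _ _).1 (hS ▸ List.mem_cons_self)
    obtain ⟨hp1A, hp1B, hp2⟩ := (mem_pvBuildT A B p).1 hpT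
    obtain ⟨haltB, haltA, haltmin⟩ := alt_min A B ⟨c0, hc0B, hc0A⟩
    have hmin := PySem.List.key_head_sorted_le _ _ hS
    have h1 : p.2 ≤ (pvFidx (findLeftmostAInB_alt A B) B : Int) := by
      have hm : ((findLeftmostAInB_alt A B, (pvFidx (findLeftmostAInB_alt A B) B : Int)) : Int × Int) ∈ pvBuildT A B :=
        (mem_pvBuildT A B _).2 ⟨haltA, haltB, rfl⟩
      exact hmin _ hm
    have h2 : pvFidx (findLeftmostAInB_alt A B) B ≤ pvFidx p.1 B := haltmin p.1 hp1A hp1B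
    have heq : pvFidx p.1 B = pvFidx (findLeftmostAInB_alt A B) B := by
      rw [hp2] at h1; omega
    exact pvFidx_inj hp1B haltB heq
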